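-- pv_equiv track=rewrite | github.com/suryansh2020/TrafficData | post1/src/highwayFinder.py | set_matches
-- ===== SOURCE A (Python) =====
-- def set_matches(agree):
--     """ Compare sets to find intersection """
--     first = True
--     results = []
--     if len(agree) < 2:
--         return None
--     while len(agree) > 0:
--         if first:
--             base = agree.pop()
--             first = False
--         else:
--             for item in base - agree.pop():
--                 results.append(item)
--     return set(results)
-- ===== SOURCE B (Python) =====
-- def set_matches(agree):
--     """ Compare sets to find intersection """
--     if len(agree) < 2:
--         return None
--     others, base = agree[:-1], agree[-1]
--     out = []
--     cand = list(base)
--     for s in reversed(others):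
--         out.extend(x for x in cand if x not in s)
--         cand = [x for x in cand if x in s]
--     return set(out)
-- ===== Notes on version B (the rewrite author's own statement) =====
-- stated objective: faster
-- what changed: A pops every other set and appends the full difference base - s for each (re-scanning all of base per set); B keeps one shrinking candidate list (base minus the growing intersection of the sets seen so far), emitting each element once at the first set that excludes it, so each step touches only the surviving candidates.
import Mathlib
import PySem

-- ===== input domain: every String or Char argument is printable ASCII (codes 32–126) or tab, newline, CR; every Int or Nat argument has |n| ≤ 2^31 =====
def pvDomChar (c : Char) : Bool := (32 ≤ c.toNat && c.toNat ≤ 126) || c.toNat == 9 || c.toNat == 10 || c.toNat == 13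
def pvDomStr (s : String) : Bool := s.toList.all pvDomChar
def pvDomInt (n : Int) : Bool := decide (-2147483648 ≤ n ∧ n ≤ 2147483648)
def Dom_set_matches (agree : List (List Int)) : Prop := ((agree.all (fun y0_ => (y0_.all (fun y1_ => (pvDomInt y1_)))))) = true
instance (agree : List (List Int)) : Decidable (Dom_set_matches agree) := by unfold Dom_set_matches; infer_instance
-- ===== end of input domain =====

-- B replaces A's repeated full-base set differences by one shrinking candidate list (base minus the
-- growing intersection, emitted as soon as an excluding set is found); equivalence is about the RETURN
-- value only: Python A empties its argument list by pop(), B does not mutate it.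

-- ===== PORT A =====
-- the 'while len(agree) > 0' loop of A: pop from the end; first pop sets base, later pops append base - popped
def set_matchesLoop : List (List Int) → Bool → List Int → List Int → List Int
  | agree, first, base, results =>
    match h : PySem.List.pop? agree (-1) with
    | none => PySem.Set.ofList results                                    -- loop exits, return set(results)
    | some (top, rest) =>
      if first then set_matchesLoop rest false top results
      else set_matchesLoop rest false base (results ++ PySem.Set.diff base top)
  termination_by agree _ _ _ => agree.length
  decreasing_by
    all_goals (have := PySem.List.length_of_pop?_eq_some _ h; simp only [] at this ⊢; omega)

def set_matches (agree : List (List Int)) : Option (List Int) :=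
  if agree.length < 2 then none
  else some (set_matchesLoop agree true [] [])   -- base starts unassigned in A; [] is never read (first pop assigns it)

-- ===== PORT B =====
-- one loop step of B: emit candidates not in s, keep candidates in s
def set_matches_altStep (p : List Int × List Int) (s : List Int) : List Int × List Int :=
  (p.1 ++ p.2.filter (fun x => !PySem.Set.contains s x),
   p.2.filter (fun x => PySem.Set.contains s x))

def set_matches_alt (agree : List (List Int)) : Option (List Int) :=
  if agree.length < 2 then none
  else
    let others := PySem.List.slice agree none (some (-1))                 -- agree[:-1]
    let base := (PySem.List.pyGet? agree (-1)).getD []                    -- agree[-1]; never none under the length guard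
    let r := others.reverse.foldl set_matches_altStep ([], base)          -- cand starts as list(base)
    some (PySem.Set.ofList r.1)

-- ===== PRECONDITION & SPEC =====
def Spec_set_matches (agree : List (List Int)) (out : Option (List Int)) : Prop := out = set_matches_alt agree
instance (agree : List (List Int)) (out : Option (List Int)) : Decidable (Spec_set_matches agree out) := by unfold Spec_set_matches; infer_instance

-- ===== CLAIM (what is proved, stated in full; the proofs are below) =====
def Claim_equal_set_matches : Prop := ∀ (agree : List (List Int)), Dom_set_matches agree → Spec_set_matches agree (set_matches agree)

-- ===== LEMMAS AND PROOFS =====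

theorem loopA_nil (first : Bool) (base results : List Int) :
    set_matchesLoop [] first base results = PySem.Set.ofList results := by
  rw [set_matchesLoop]
  split
  · rfl
  · rename_i top rest heq
    have hnone : PySem.List.pop? ([] : List (List Int)) (-1) = none := rfl
    rw [hnone] at heq
    cases heq

theorem loopA_append (init : List (List Int)) (x : List Int) (base results : List Int) :
    set_matchesLoop (init ++ [x]) false base results
      = set_matchesLoop init false base (results ++ PySem.Set.diff base x) := by
  rw [set_matchesLoop]
  split
  · rename_i heq; rw [PySem.List.pop?_last] at heq; cases heq
  · rename_i top rest heq
    rw [PySem.List.pop?_last] at heq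
    cases heq
    rfl

theorem loopA_append_first (init : List (List Int)) (x : List Int) (base results : List Int) :
    set_matchesLoop (init ++ [x]) true base results = set_matchesLoop init false x results := by
  rw [set_matchesLoop]
  split
  · rename_i heq; rw [PySem.List.pop?_last] at heq; cases heq
  · rename_i top rest heq
    rw [PySem.List.pop?_last] at heq
    cases heq
    rfl

theorem loopA_eq (m : List (List Int)) (base results : List Int) :
    set_matchesLoop m false base results
      = PySem.Set.ofList (m.reverse.foldl (fun r s => r ++ PySem.Set.diff base s) results) := by
  induction m using List.reverseRecOn generalizing results with
  | nil => simpa using loopA_nil false base results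
  | append_singleton init x ih =>
      rw [loopA_append, ih]
      simp

theorem ofList_append (a u : List Int) :
    PySem.Set.ofList (a ++ u) = PySem.Set.update (PySem.Set.ofList a) u := by
  simp [PySem.Set.ofList, PySem.Set.update, List.foldl_append, PySem.Set.empty]

theorem ofList_foldl_append (t : List (List Int)) (f : List Int → List Int) (a : List Int) :
    PySem.Set.ofList (t.foldl (fun r s => r ++ f s) a)
      = t.foldl (fun S s => PySem.Set.update S (f s)) (PySem.Set.ofList a) := by
  induction t generalizing a with
  | nil => rfl
  | cons s t ih => simp only [List.foldl_cons, ih, ofList_append]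

-- adding elements already present in a superset of S never changes an update
theorem update_filter_subset (S : List Int) (T : PySem.Set Int) (u : List Int)
    (h : ∀ x, S.contains x → T.contains x) :
    PySem.Set.update T (u.filter (fun x => !S.contains x)) = PySem.Set.update T u := by
  induction u generalizing T with
  | nil => rfl
  | cons x u ih =>
      by_cases hx : S.contains x
      · have hm : x ∈ T := by simpa using h x hx
        have hadd : PySem.Set.add T x = T := by
          simp [PySem.Set.add, PySem.Set.contains, hm]
        simp only [List.filter_cons, hx, Bool.not_true, PySem.Set.update, List.foldl_cons, hadd]
        exact ih T h
      · simp only [List.filter_cons, hx, Bool.not_false, PySem.Set.update, List.foldl_cons]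
        refine ih (PySem.Set.add T x) ?_
        intro y hy
        have hTy := h y hy
        simp only [PySem.Set.add]
        split
        · exact hTy
        · have hyT : y ∈ T := by simpa using hTy
          simp [hyT]

-- main invariant: B's candidate list is base filtered by "not yet output"; both folds build the same set
theorem main_lemma (t : List (List Int)) (base out cand : List Int)
    (hc : cand = base.filter (fun x => !out.contains x)) :
    PySem.Set.ofList (t.foldl (fun r s => r ++ PySem.Set.diff base s) out)
      = PySem.Set.ofList ((t.foldl set_matches_altStep (out, cand)).1) := by
  induction t generalizing out cand with
  | nil => rfl
  | cons s t ih =>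
      simp only [List.foldl_cons, set_matches_altStep]
      have hsub : ∀ (u : List Int),
          PySem.Set.update (PySem.Set.ofList out) (u.filter (fun x => !out.contains x))
            = PySem.Set.update (PySem.Set.ofList out) u := by
        intro u
        refine update_filter_subset out _ u ?_
        intro x hx
        have hm : x ∈ out := by simpa using hx
        have hmo : x ∈ PySem.Set.ofList out := (PySem.Set.mem_ofList out x).mpr hm
        simpa [PySem.Set.contains, List.contains_eq_mem] using hmo
      have hout' : PySem.Set.ofList (out ++ PySem.Set.diff base s)
          = PySem.Set.ofList (out ++ cand.filter (fun x => !PySem.Set.contains s x)) := by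
        rw [ofList_append, ofList_append, hc]
        have e1 : (base.filter (fun x => !out.contains x)).filter (fun x => !PySem.Set.contains s x)
            = (PySem.Set.diff base s).filter (fun x => !out.contains x) := by
          simp only [PySem.Set.diff, PySem.Set.contains, List.filter_filter]
          exact List.filter_congr (fun x _ => Bool.and_comm _ _)
        rw [e1, hsub]
      have hc' : cand.filter (fun x => PySem.Set.contains s x)
          = base.filter (fun x =>
              !(out ++ cand.filter (fun y => !PySem.Set.contains s y)).contains x) := by
        subst hc
        rw [List.filter_filter]
        refine List.filter_congr ?_
        intro x hxb
        simp only [PySem.Set.contains, List.contains_eq_mem, List.mem_append, List.mem_filter,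
          Bool.not_eq_true', decide_eq_false_iff_not]
        by_cases ho : x ∈ out
        · simp [ho]
        · by_cases hs : x ∈ s
          · simp [ho, hxb, hs]
          · simp [ho, hxb, hs]
      calc PySem.Set.ofList
            ((t.foldl (fun r s => r ++ PySem.Set.diff base s)) (out ++ PySem.Set.diff base s))
          = t.foldl (fun S s => PySem.Set.update S (PySem.Set.diff base s))
              (PySem.Set.ofList (out ++ PySem.Set.diff base s)) := ofList_foldl_append ..
        _ = t.foldl (fun S s => PySem.Set.update S (PySem.Set.diff base s))
              (PySem.Set.ofList (out ++ cand.filter (fun x => !PySem.Set.contains s x))) := by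
              rw [hout']
        _ = PySem.Set.ofList (t.foldl (fun r s => r ++ PySem.Set.diff base s)
              (out ++ cand.filter (fun x => !PySem.Set.contains s x))) :=
              (ofList_foldl_append ..).symm
        _ = _ := ih _ _ hc'

-- ===== VERDICT (by name: the statement is the Claim_ definition above) =====
theorem set_matches_spec : Claim_equal_set_matches := by
  unfold Claim_equal_set_matches Spec_set_matches
  intro agree _
  unfold set_matches set_matches_alt
  by_cases h : agree.length < 2
  · simp [h]
  · simp only [h, if_false]
    induction agree using List.reverseRecOn with
    | nil => simp at h
    | append_singleton init b _ =>
        rw [loopA_append_first, loopA_eq]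
        simp only [PySem.List.slice_to_neg_one, PySem.List.pyGet?_neg_one_append_singleton,
          Option.getD_some, List.dropLast_concat]
        rw [main_lemma init.reverse b [] b (by simp)]
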